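-- pv_equiv track=rewrite | github.com/boksic1986/PGT-A | pgta/predict/branch_b/calling.py | iter_boolean_blocks
-- ===== SOURCE A (Python) =====
-- def iter_boolean_blocks(mask_values, min_block_bins):
--     blocks = []
--     start = None
--     for index, is_selected in enumerate(mask_values):
--         if is_selected and start is None:
--             start = index
--             continue
--         if (not is_selected) and start is not None:
--             if (index - start) >= int(min_block_bins):
--                 blocks.append((start, index))
--             start = None
--     if start is not None and (len(mask_values) - start) >= int(min_block_bins):
--         blocks.append((start, len(mask_values)))
--     return blocks
-- ===== SOURCE B (Python) =====
-- from itertools import groupby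
--
--
-- def iter_boolean_blocks(mask_values, min_block_bins):
--     blocks = []
--     index = 0
--     for value, group in groupby(mask_values, key=bool):
--         length = sum(1 for _ in group)
--         if value and length >= int(min_block_bins):
--             blocks.append((index, index + length))
--         index += length
--     return blocks
-- ===== Notes on version B (the rewrite author's own statement) =====
-- stated objective: idiomatic
-- what changed: Replaces the stateful start/None scan with an itertools.groupby traversal over runs: each maximal run is consumed as one group and emitted directly if it is a qualifying True run.
import Mathlib
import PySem

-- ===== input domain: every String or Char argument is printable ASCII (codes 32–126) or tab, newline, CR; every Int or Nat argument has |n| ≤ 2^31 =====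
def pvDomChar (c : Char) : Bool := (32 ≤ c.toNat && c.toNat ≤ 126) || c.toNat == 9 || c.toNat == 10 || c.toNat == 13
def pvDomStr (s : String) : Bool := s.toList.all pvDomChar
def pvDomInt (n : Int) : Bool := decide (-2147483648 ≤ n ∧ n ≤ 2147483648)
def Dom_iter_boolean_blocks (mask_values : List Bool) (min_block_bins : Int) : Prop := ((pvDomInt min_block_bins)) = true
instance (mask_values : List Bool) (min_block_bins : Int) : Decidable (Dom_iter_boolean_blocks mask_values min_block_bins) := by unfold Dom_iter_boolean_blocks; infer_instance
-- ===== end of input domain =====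

-- B replaces A's stateful start/None scan with a run-at-a-time (groupby-style) traversal; idiomatic, same cost.


-- ===== PORT A =====
-- A's for-loop over enumerate(mask_values), as structural recursion carrying
-- the running index, the open-run start (Option Int) and the accumulated blocks.
def blocksLoopA (mn : Int) : List Bool → Int → Option Int → List (Int × Int) → (List (Int × Int) × Option Int)
  | [], _, start, blocks => (blocks, start)
  | v :: rest, idx, start, blocks =>
    if v && start.isNone then
      blocksLoopA mn rest (idx + 1) (some idx) blocks
    else if !v && start.isSome then
      match start with
      | some s =>
          blocksLoopA mn rest (idx + 1) none
            (if idx - s ≥ mn then blocks ++ [(s, idx)] else blocks)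
      | none => blocksLoopA mn rest (idx + 1) none blocks  -- unreachable (start.isSome)
    else
      blocksLoopA mn rest (idx + 1) start blocks

def iter_boolean_blocks (mask_values : List Bool) (min_block_bins : Int) : List (Int × Int) :=
  let r := blocksLoopA min_block_bins mask_values 0 none []
  match r.2 with
  | some s =>
      if (mask_values.length : Int) - s ≥ min_block_bins then r.1 ++ [(s, (mask_values.length : Int))]
      else r.1
  | none => r.1

-- ===== PORT B =====
-- B's groupby loop: each step consumes one maximal run (takeWhile/dropWhile on
-- equality with the head value), emits it if it is a qualifying True run, and
-- advances the running index by the run length.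
def altRuns (mn : Int) : List Bool → Int → List (Int × Int)
  | [], _ => []
  | v :: t, idx =>
    let len := ((v :: t).takeWhile (· == v)).length
    let rest := (v :: t).dropWhile (· == v)
    (if v && decide ((len : Int) ≥ mn) then [(idx, idx + (len : Int))] else [])
      ++ altRuns mn rest (idx + (len : Int))
  termination_by xs _ => xs.length
  decreasing_by
    simp only [List.dropWhile_cons, BEq.rfl, if_pos]
    exact Nat.lt_succ_of_le (List.length_dropWhile_le _ _)

def iter_boolean_blocks_alt (mask_values : List Bool) (min_block_bins : Int) : List (Int × Int) :=
  altRuns min_block_bins mask_values 0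

-- ===== PRECONDITION & SPEC =====
def Spec_iter_boolean_blocks (mask_values : List Bool) (min_block_bins : Int) (out : List (Int × Int)) : Prop := out = iter_boolean_blocks_alt mask_values min_block_bins
instance (mask_values : List Bool) (min_block_bins : Int) (out : List (Int × Int)) : Decidable (Spec_iter_boolean_blocks mask_values min_block_bins out) := by unfold Spec_iter_boolean_blocks; infer_instance

-- ===== CLAIM (what is proved, stated in full; the proofs are below) =====
def Claim_equal_iter_boolean_blocks : Prop := ∀ (mask_values : List Bool) (min_block_bins : Int), Dom_iter_boolean_blocks mask_values min_block_bins → Spec_iter_boolean_blocks mask_values min_block_bins (iter_boolean_blocks mask_values min_block_bins)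

-- ===== LEMMAS AND PROOFS =====

-- Close A's loop result with the final end-of-list check, at end index `e`.
def finishA (mn : Int) (r : List (Int × Int) × Option Int) (e : Int) : List (Int × Int) :=
  match r.2 with
  | some s => if e - s ≥ mn then r.1 ++ [(s, e)] else r.1
  | none => r.1

-- Skipping one leading False is absorbed by B's whole-False-run skip.
theorem altRuns_false (mn : Int) (t : List Bool) (idx : Int) :
    altRuns mn (false :: t) idx = altRuns mn t (idx + 1) := by
  match t with
  | [] => simp [altRuns]
  | true :: t' =>
      simp [altRuns, List.takeWhile, List.dropWhile]
  | false :: t' =>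
      rw [altRuns, altRuns]
      simp only [List.takeWhile_cons, List.dropWhile_cons]
      norm_num
      ring_nf

-- B's treatment of the still-open run A carries as state `some s`.
def openRun (mn : Int) (s : Int) (xs : List Bool) (idx : Int) : List (Int × Int) :=
  let k := (xs.takeWhile (· == true)).length
  (if (idx + k) - s ≥ mn then [(s, idx + (k : Int))] else [])
    ++ altRuns mn (xs.dropWhile (· == true)) (idx + (k : Int))

-- The simultaneous loop invariant for both of A's states.
theorem loop_invariant (mn : Int) (xs : List Bool) :
    (∀ idx blocks,
       finishA mn (blocksLoopA mn xs idx none blocks) (idx + xs.length)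
         = blocks ++ altRuns mn xs idx) ∧
    (∀ idx s blocks,
       finishA mn (blocksLoopA mn xs idx (some s) blocks) (idx + xs.length)
         = blocks ++ openRun mn s xs idx) := by
  induction xs with
  | nil =>
      constructor
      · intro idx blocks; simp [blocksLoopA, finishA, altRuns]
      · intro idx s blocks
        simp only [blocksLoopA, finishA, openRun, List.takeWhile_nil, List.dropWhile_nil,
          altRuns, List.length_nil]
        split_ifs with h <;> simp_all
  | cons v rest ih =>
      obtain ⟨ihN, ihS⟩ := ih
      have hlen : ∀ (b : Bool) (idx : Int), idx + ((b :: rest).length : Int)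
          = (idx + 1) + (rest.length : Int) := by intro b idx; simp; ring
      constructor
      · intro idx blocks
        cases v with
        | true =>
            simp only [blocksLoopA, Option.isNone_none, Bool.and_true, reduceIte]
            rw [hlen, ihS]
            rw [altRuns]
            simp only [openRun, List.takeWhile_cons, List.dropWhile_cons, beq_self_eq_true,
              reduceIte, List.length_cons, Bool.true_and, decide_eq_true_eq]
            push_cast
            ring_nf
        | false =>
            simp only [blocksLoopA, Option.isNone_none, Option.isSome_none, Bool.false_and,
              Bool.and_false, Bool.false_eq_true, if_false]
            rw [hlen, ihN, altRuns_false]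
      · intro idx s blocks
        cases v with
        | true =>
            simp only [blocksLoopA, Option.isNone_some, Option.isSome_some, Bool.and_false,
              Bool.not_true, Bool.false_and, Bool.false_eq_true, if_false]
            rw [hlen, ihS]
            simp only [openRun, List.takeWhile_cons, List.dropWhile_cons, beq_self_eq_true,
              reduceIte, List.length_cons]
            push_cast
            ring_nf
        | false =>
            simp only [blocksLoopA, Option.isNone_some, Option.isSome_some, Bool.false_and,
              Bool.not_false, Bool.and_true, Bool.false_eq_true, if_false, if_true]
            rw [hlen, ihN, ← altRuns_false]
            simp only [openRun, List.takeWhile_cons, List.dropWhile_cons]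
            norm_num
            split_ifs with h <;> simp

-- ===== VERDICT (by name: the statement is the Claim_ definition above) =====
theorem iter_boolean_blocks_spec : Claim_equal_iter_boolean_blocks := by
  intro mask_values min_block_bins _
  unfold Spec_iter_boolean_blocks iter_boolean_blocks iter_boolean_blocks_alt
  have h := (loop_invariant min_block_bins mask_values).1 0 []
  simpa [finishA] using h
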